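/- Every segment file of the program, imported together (a consistency check). -/
import Gif.Spec.All
import Gif.Spec.ReaderSegs
import Gif.Spec.Carry
import Gif.Spec.Words
import Gif.Spec.Words2
import Gif.Spec.HeapCarry
import Gif.Spec.FrameCarry
import Gif.Spec.Seg_DGifGetRecordType
import Gif.Spec.Seg_DGifBufferedInput
import Gif.Spec.Seg_DGifGetExtensionNext
import Gif.Spec.Seg_DGifGetExtension
import Gif.Spec.Seg_DGifGetCodeNext
import Gif.Spec.Seg_DGifSetupDecompress
import Gif.Spec.Seg_DGifDecompressInput
import Gif.Spec.Seg_DGifDecompressLine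
import Gif.Spec.LzwCarry
import Gif.Spec.Seg_DGifGetLine
import Gif.Spec.Seg_DGifGetScreenDesc
import Gif.Spec.Seg_DGifOpen
import Gif.Spec.Seg_DGifGetImageHeader
import Gif.Spec.Seg_DGifGetImageDesc
import Gif.Spec.Seg_GifMakeMapObject
import Gif.Spec.Seg_GifAddExtensionBlock
import Gif.Spec.Seg_GifFreeExtensions
import Gif.Spec.Seg_GifFreeSavedImages
import Gif.Spec.Seg_DGifDecreaseImageCounter
import Gif.Spec.Seg_DGifSlurp
import Gif.Spec.SlurpCarry
import Gif.Spec.Seg_DGifCloseFile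
import Gif.Spec.Seg_digest_map
import Gif.Spec.Seg_digest_extensions
import Gif.Spec.Seg_digest_file
import Gif.Spec.Seg_gif_decode
import Gif.Spec.Seg_prog_main
import Gif.Spec.AllocCarry
import Gif.Spec.DriverCarry
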